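-- pv_equiv track=rewrite | github.com/manas-17045/LeetcodeSolutions | Leetcode 2301-2400/2334/2334-1.py | validSubarraySize
-- ===== SOURCE A (Python) =====
-- def validSubarraySize(nums: list[int], threshold: int) -> int:
--     """
--     Finds the length of a valid subarray such that for some element `x` in the subarray,
--     `x * k > threshold`, where `k` is the length of the subarray, and `x` is the minimum
--     element in that subarray.
--
--     Args:
--         nums (list[int]): The input list of integers.
--         threshold (int): The threshold value.
--     Returns:
--         int: The length of a valid subarray, or -1 if no such subarray exists.
--     """
--     n = len(nums)
--
--     prevLess = [-1] * n
--     stack = []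
--     for i in range(n):
--         while stack and nums[stack[-1]] >= nums[i]:
--             stack.pop()
--         if stack:
--             prevLess[i] = stack[-1]
--         stack.append(i)
--
--     nextLess = [n] * n
--     stack = []
--     for i in range(n - 1, -1, -1):
--         while stack and nums[stack[-1]] >= nums[i]:
--             stack.pop()
--         if stack:
--             nextLess[i] = stack[-1]
--         stack.append(i)
--
--     for i in range(n):
--         subLength = nextLess[i] - prevLess[i] - 1
--         if nums[i] * subLength > threshold:
--             return subLength
--
--     return -1
-- ===== SOURCE B (Python) =====
-- def validSubarraySize(nums, threshold):
--     # Stack-free: for each index, scan outward for the strictly-smaller boundaries directly.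
--     n = len(nums)
--     for i in range(n):
--         x = nums[i]
--         j = i - 1
--         while j >= 0 and nums[j] >= x:
--             j -= 1
--         k = i + 1
--         while k < n and nums[k] >= x:
--             k += 1
--         sub = k - j - 1
--         if x * sub > threshold:
--             return sub
--     return -1
-- ===== Notes on version B (the rewrite author's own statement) =====
-- stated objective: simpler
-- what changed: Replaces A's two monotonic-stack passes building prevLess/nextLess arrays with a single loop that, for each index, scans directly outward for the nearest strictly-smaller neighbours (no stacks, no arrays).
import Mathlib
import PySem

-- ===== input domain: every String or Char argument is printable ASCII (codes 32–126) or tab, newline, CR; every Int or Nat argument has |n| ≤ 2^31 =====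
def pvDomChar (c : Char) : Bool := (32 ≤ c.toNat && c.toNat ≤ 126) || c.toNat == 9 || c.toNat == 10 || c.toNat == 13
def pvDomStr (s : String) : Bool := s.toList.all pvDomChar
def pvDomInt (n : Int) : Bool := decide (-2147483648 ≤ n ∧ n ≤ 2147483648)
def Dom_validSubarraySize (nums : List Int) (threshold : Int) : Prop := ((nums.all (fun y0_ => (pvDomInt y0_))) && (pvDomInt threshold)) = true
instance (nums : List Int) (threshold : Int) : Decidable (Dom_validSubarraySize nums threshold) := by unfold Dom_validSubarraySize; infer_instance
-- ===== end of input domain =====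

-- B replaces A's two monotonic-stack passes by direct outward scans per index (simpler, no stacks/arrays); same result proved for all inputs.

-- ===== PORT A =====
-- 'while stack and nums[stack[-1]] >= nums[i]: stack.pop()' (stack top = list head)
def pvPopWhile (nums : List Int) (x : Int) : List Nat → List Nat
  | [] => []
  | j :: rest => if x ≤ nums.getD j 0 then pvPopWhile nums x rest else j :: rest

-- one iteration of either stack pass: pop, record stack top into the array slot i (if any), push i.
-- (both of A's passes run this same body; stack indices are always in range, so getD is exact)
def pvPassStep (nums : List Int) (st : List Int × List Nat) (i : Nat) : List Int × List Nat :=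
  let s := pvPopWhile nums (nums.getD i 0) st.2
  (match s with
   | [] => st.1
   | j :: _ => st.1.set i (j : Int), i :: s)

-- A's final 'for i in range(n): … return subLength' loop
def pvFinalLoop (nums : List Int) (t : Int) (pl nl : List Int) (i : Nat) : Int :=
  if _h : i < nums.length then
    let sub := nl.getD i 0 - pl.getD i 0 - 1
    if nums.getD i 0 * sub > t then sub else pvFinalLoop nums t pl nl (i + 1)
  else -1
termination_by nums.length - i

def validSubarraySize (nums : List Int) (threshold : Int) : Int :=
  let n := nums.length
  let pl := ((List.range n).foldl (pvPassStep nums) (List.replicate n (-1), [])).1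
  -- range(n-1,-1,-1) is range(n) reversed
  let nl := ((List.range n).reverse.foldl (pvPassStep nums) (List.replicate n (n : Int), [])).1
  pvFinalLoop nums threshold pl nl 0

-- ===== PORT B =====
-- 'j = i-1; while j >= 0 and nums[j] >= x: j -= 1' — the Nat argument is j+1, so 0 plays Python's j == -1
def pvPrevScan (nums : List Int) (x : Int) : Nat → Int
  | 0 => -1
  | j + 1 => if nums.getD j 0 < x then (j : Int) else pvPrevScan nums x j

-- 'k = i+1; while k < n and nums[k] >= x: k += 1'
def pvNextScan (nums : List Int) (x : Int) (k : Nat) : Int :=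
  if _h : k < nums.length then
    if nums.getD k 0 < x then (k : Int) else pvNextScan nums x (k + 1)
  else (nums.length : Int)
termination_by nums.length - k

def pvAltLoop (nums : List Int) (t : Int) (i : Nat) : Int :=
  if _h : i < nums.length then
    let x := nums.getD i 0
    let sub := pvNextScan nums x (i + 1) - pvPrevScan nums x i - 1
    if x * sub > t then sub else pvAltLoop nums t (i + 1)
  else -1
termination_by nums.length - i

def validSubarraySize_alt (nums : List Int) (threshold : Int) : Int :=
  pvAltLoop nums threshold 0

-- ===== PRECONDITION & SPEC =====
def Spec_validSubarraySize (nums : List Int) (threshold : Int) (out : Int) : Prop := out = validSubarraySize_alt nums threshold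
instance (nums : List Int) (threshold : Int) (out : Int) : Decidable (Spec_validSubarraySize nums threshold out) := by unfold Spec_validSubarraySize; infer_instance

-- ===== CLAIM (what is proved, stated in full; the proofs are below) =====
def Claim_equal_validSubarraySize : Prop := ∀ (nums : List Int) (threshold : Int), Dom_validSubarraySize nums threshold → Spec_validSubarraySize nums threshold (validSubarraySize nums threshold)

-- ===== LEMMAS AND PROOFS =====

-- stack contents after A's left pass has processed indices 0..i-1
def pvStkL (nums : List Int) : Nat → List Nat
  | 0 => []
  | i + 1 => i :: pvPopWhile nums (nums.getD i 0) (pvStkL nums i)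

-- stack contents after A's right pass has processed indices n-1..i
def pvStkR (nums : List Int) (i : Nat) : List Nat :=
  if _h : i < nums.length then i :: pvPopWhile nums (nums.getD i 0) (pvStkR nums (i + 1)) else []
termination_by nums.length - i

lemma pvPopWhile_sublist (nums : List Int) (x : Int) (s : List Nat) :
    (pvPopWhile nums x s).Sublist s := by
  induction s with
  | nil => simp [pvPopWhile]
  | cons a s ih =>
    simp only [pvPopWhile]
    split
    · exact ih.trans (List.sublist_cons_self a s)
    · exact List.Sublist.refl _

lemma pvMem_popWhile {nums : List Int} {x : Int} {s : List Nat}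
    (hp : s.Pairwise (fun a b => nums.getD b 0 < nums.getD a 0)) (j : Nat) :
    j ∈ pvPopWhile nums x s ↔ j ∈ s ∧ nums.getD j 0 < x := by
  induction s with
  | nil => simp [pvPopWhile]
  | cons a s ih =>
    rcases List.pairwise_cons.mp hp with ⟨ha, hp'⟩
    simp only [pvPopWhile]
    split
    · rename_i hle
      rw [ih hp']
      constructor
      · rintro ⟨hs, hv⟩; exact ⟨List.mem_cons_of_mem _ hs, hv⟩
      · rintro ⟨hs, hv⟩
        rcases List.mem_cons.mp hs with rfl | hs
        · omega
        · exact ⟨hs, hv⟩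
    · rename_i hlt
      push_neg at hlt
      constructor
      · intro hs
        refine ⟨hs, ?_⟩
        rcases List.mem_cons.mp hs with rfl | hs
        · exact hlt
        · exact lt_trans (ha j hs) hlt
      · exact fun h => h.1

lemma pvHead_max {s : List Nat} (hp : s.Pairwise (fun a b : Nat => b < a))
    {h : Nat} {t : List Nat} (he : s = h :: t) {j : Nat} (hj : j ∈ s) : j ≤ h := by
  subst he
  rcases List.mem_cons.mp hj with rfl | hj
  · exact le_refl _
  · exact le_of_lt ((List.pairwise_cons.mp hp).1 j hj)

lemma pvHead_min {s : List Nat} (hp : s.Pairwise (fun a b : Nat => a < b))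
    {h : Nat} {t : List Nat} (he : s = h :: t) {j : Nat} (hj : j ∈ s) : h ≤ j := by
  subst he
  rcases List.mem_cons.mp hj with rfl | hj
  · exact le_refl _
  · exact le_of_lt ((List.pairwise_cons.mp hp).1 j hj)

lemma pvStkL_inv (nums : List Int) (i : Nat) :
    (pvStkL nums i).Pairwise (fun a b => b < a ∧ nums.getD b 0 < nums.getD a 0) ∧
    ∀ j, j ∈ pvStkL nums i ↔
      j < i ∧ ∀ k, j < k → k < i → nums.getD j 0 < nums.getD k 0 := by
  induction i with
  | zero => simp [pvStkL]
  | succ i ih =>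
    rcases ih with ⟨hp, hm⟩
    have hpv : (pvStkL nums i).Pairwise (fun a b => nums.getD b 0 < nums.getD a 0) :=
      hp.imp (fun h => h.2)
    have hmemP : ∀ j, j ∈ pvPopWhile nums (nums.getD i 0) (pvStkL nums i) ↔
        j ∈ pvStkL nums i ∧ nums.getD j 0 < nums.getD i 0 := pvMem_popWhile hpv
    have hPp : (pvPopWhile nums (nums.getD i 0) (pvStkL nums i)).Pairwise
        (fun a b => b < a ∧ nums.getD b 0 < nums.getD a 0) :=
      hp.sublist (pvPopWhile_sublist _ _ _)
    constructor
    · simp only [pvStkL]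
      rw [List.pairwise_cons]
      refine ⟨?_, hPp⟩
      intro b hb
      rcases (hmemP b).mp hb with ⟨hbS, hbv⟩
      exact ⟨((hm b).mp hbS).1, hbv⟩
    · intro j
      simp only [pvStkL, List.mem_cons]
      constructor
      · rintro (rfl | hj)
        · exact ⟨Nat.lt_succ_self _, fun k h1 h2 => by omega⟩
        · rcases (hmemP j).mp hj with ⟨hjS, hjv⟩
          rcases (hm j).mp hjS with ⟨hji, hjk⟩
          refine ⟨by omega, fun k h1 h2 => ?_⟩
          have : k < i ∨ k = i := by omega
          rcases this with hk | rfl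
          · exact hjk k h1 hk
          · exact hjv
      · rintro ⟨hj, hk⟩
        by_cases hji : j = i
        · exact Or.inl hji
        · right
          have hji' : j < i := by omega
          refine (hmemP j).mpr ⟨(hm j).mpr ⟨hji', fun k h1 h2 => hk k h1 (by omega)⟩, ?_⟩
          exact hk i hji' (Nat.lt_succ_self _)

lemma pvStkR_inv (nums : List Int) : ∀ f i, nums.length - i = f →
    ((pvStkR nums i).Pairwise (fun a b => a < b ∧ nums.getD b 0 < nums.getD a 0) ∧
    ∀ j, j ∈ pvStkR nums i ↔
      i ≤ j ∧ j < nums.length ∧ ∀ k, i ≤ k → k < j → nums.getD j 0 < nums.getD k 0) := by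
  intro f
  induction f with
  | zero =>
    intro i hi
    have hni : ¬ i < nums.length := by omega
    rw [pvStkR, dif_neg hni]
    simp only [List.Pairwise.nil, List.not_mem_nil, true_and]
    intro j
    constructor
    · intro h; cases h
    · rintro ⟨h1, h2, _⟩; omega
  | succ f ih =>
    intro i hi
    by_cases hin : i < nums.length
    · rcases ih (i + 1) (by omega) with ⟨hp, hm⟩
      have hpv : (pvStkR nums (i + 1)).Pairwise (fun a b => nums.getD b 0 < nums.getD a 0) :=
        hp.imp (fun h => h.2)
      have hmemP : ∀ j, j ∈ pvPopWhile nums (nums.getD i 0) (pvStkR nums (i + 1)) ↔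
          j ∈ pvStkR nums (i + 1) ∧ nums.getD j 0 < nums.getD i 0 := pvMem_popWhile hpv
      have hPp : (pvPopWhile nums (nums.getD i 0) (pvStkR nums (i + 1))).Pairwise
          (fun a b => a < b ∧ nums.getD b 0 < nums.getD a 0) :=
        hp.sublist (pvPopWhile_sublist _ _ _)
      rw [pvStkR, dif_pos hin]
      constructor
      · rw [List.pairwise_cons]
        refine ⟨?_, hPp⟩
        intro b hb
        rcases (hmemP b).mp hb with ⟨hbS, hbv⟩
        exact ⟨by have := ((hm b).mp hbS).1; omega, hbv⟩
      · intro j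
        rw [List.mem_cons]
        constructor
        · rintro (rfl | hj)
          · exact ⟨le_refl _, hin, fun k h1 h2 => by omega⟩
          · rcases (hmemP j).mp hj with ⟨hjS, hjv⟩
            rcases (hm j).mp hjS with ⟨hji, hjn, hjk⟩
            refine ⟨by omega, hjn, fun k h1 h2 => ?_⟩
            have : k = i ∨ i + 1 ≤ k := by omega
            rcases this with rfl | hk
            · exact hjv
            · exact hjk k hk h2
        · rintro ⟨hj, hjn, hk⟩
          by_cases hji : j = i
          · exact Or.inl hji
          · right
            have hji' : i + 1 ≤ j := by omega
            refine (hmemP j).mpr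
              ⟨(hm j).mpr ⟨hji', hjn, fun k h1 h2 => hk k (by omega) h2⟩, ?_⟩
            exact hk i (le_refl _) (by omega)
    · rw [pvStkR, dif_neg hin]
      refine ⟨List.Pairwise.nil, fun j => ?_⟩
      simp only [List.not_mem_nil]
      constructor
      · intro h; cases h
      · rintro ⟨h1, h2, _⟩; omega

lemma pvPrevScan_eq_neg (nums : List Int) (x : Int) (i : Nat)
    (h : ∀ j, j < i → x ≤ nums.getD j 0) : pvPrevScan nums x i = -1 := by
  induction i with
  | zero => rfl
  | succ i ih =>
    rw [pvPrevScan, if_neg (not_lt.mpr (h i (Nat.lt_succ_self _)))]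
    exact ih (fun j hj => h j (by omega))

lemma pvPrevScan_eq (nums : List Int) (x : Int) {i j : Nat} (hj : j < i)
    (hx : nums.getD j 0 < x) (hmax : ∀ k, j < k → k < i → x ≤ nums.getD k 0) :
    pvPrevScan nums x i = (j : Int) := by
  induction i with
  | zero => omega
  | succ i ih =>
    by_cases hji : j = i
    · subst hji; rw [pvPrevScan, if_pos hx]
    · have hji' : j < i := by omega
      rw [pvPrevScan, if_neg (not_lt.mpr (hmax i hji' (Nat.lt_succ_self _)))]
      exact ih hji' (fun k h1 h2 => hmax k h1 (by omega))

lemma pvExists_max (nums : List Int) (x : Int) {i : Nat}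
    (h : ∃ j, j < i ∧ nums.getD j 0 < x) :
    ∃ j, j < i ∧ nums.getD j 0 < x ∧ ∀ k, j < k → k < i → x ≤ nums.getD k 0 := by
  induction i with
  | zero => rcases h with ⟨j, hj, _⟩; omega
  | succ i ih =>
    by_cases hv : nums.getD i 0 < x
    · exact ⟨i, Nat.lt_succ_self _, hv, fun k h1 h2 => by omega⟩
    · rcases h with ⟨j, hj, hjv⟩
      have hji : j < i := by
        by_contra hc
        have : j = i := by omega
        subst this; exact hv hjv
      rcases ih ⟨j, hji, hjv⟩ with ⟨j0, hj0, hj0v, hj0m⟩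
      refine ⟨j0, by omega, hj0v, fun k h1 h2 => ?_⟩
      have : k < i ∨ k = i := by omega
      rcases this with hk | rfl
      · exact hj0m k h1 hk
      · exact not_lt.mp hv

lemma pvNextScan_eq_none (nums : List Int) (x : Int) : ∀ f m, nums.length - m = f →
    (∀ k, m ≤ k → k < nums.length → x ≤ nums.getD k 0) →
    pvNextScan nums x m = (nums.length : Int) := by
  intro f
  induction f with
  | zero =>
    intro m hm _
    rw [pvNextScan, dif_neg (by omega)]
  | succ f ih =>
    intro m hm h
    have hmn : m < nums.length := by omega
    rw [pvNextScan, dif_pos hmn, if_neg (not_lt.mpr (h m (le_refl _) hmn))]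
    exact ih (m + 1) (by omega) (fun k h1 h2 => h k (by omega) h2)

lemma pvNextScan_eq (nums : List Int) (x : Int) : ∀ f m, nums.length - m = f →
    ∀ j, m ≤ j → j < nums.length → nums.getD j 0 < x →
    (∀ k, m ≤ k → k < j → x ≤ nums.getD k 0) →
    pvNextScan nums x m = (j : Int) := by
  intro f
  induction f with
  | zero => intro m hm j h1 h2 _ _; omega
  | succ f ih =>
    intro m hm j h1 h2 hx hmin
    have hmn : m < nums.length := by omega
    by_cases hmj : m = j
    · subst hmj; rw [pvNextScan, dif_pos hmn, if_pos hx]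
    · have hmj' : m < j := by omega
      rw [pvNextScan, dif_pos hmn, if_neg (not_lt.mpr (hmin m (le_refl _) hmj'))]
      exact ih (m + 1) (by omega) j (by omega) h2 hx (fun k hk1 hk2 => hmin k (by omega) hk2)

lemma pvExists_min (nums : List Int) (x : Int) : ∀ f m, nums.length - m = f →
    (∃ j, m ≤ j ∧ j < nums.length ∧ nums.getD j 0 < x) →
    ∃ j, m ≤ j ∧ j < nums.length ∧ nums.getD j 0 < x ∧
      ∀ k, m ≤ k → k < j → x ≤ nums.getD k 0 := by
  intro f
  induction f with
  | zero => rintro m hm ⟨j, h1, h2, _⟩; omega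
  | succ f ih =>
    rintro m hm ⟨j, h1, h2, hx⟩
    by_cases hv : nums.getD m 0 < x
    · exact ⟨m, le_refl _, by omega, hv, fun k hk1 hk2 => by omega⟩
    · have h1' : m + 1 ≤ j := by
        by_contra hc
        have : j = m := by omega
        subst this; exact hv hx
      rcases ih (m + 1) (by omega) ⟨j, h1', h2, hx⟩ with ⟨j0, hj0, hj0n, hj0v, hj0m⟩
      refine ⟨j0, by omega, hj0n, hj0v, fun k hk1 hk2 => ?_⟩
      have : k = m ∨ m + 1 ≤ k := by omega
      rcases this with rfl | hk
      · exact not_lt.mp hv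
      · exact hj0m k hk hk2

lemma pvKeyL (nums : List Int) (i : Nat) :
    pvPrevScan nums (nums.getD i 0) i =
      (match pvPopWhile nums (nums.getD i 0) (pvStkL nums i) with
       | [] => (-1 : Int)
       | j :: _ => (j : Int)) := by
  rcases pvStkL_inv nums i with ⟨hp, hm⟩
  have hpv : (pvStkL nums i).Pairwise (fun a b => nums.getD b 0 < nums.getD a 0) :=
    hp.imp (fun h => h.2)
  have hmemP := pvMem_popWhile (x := nums.getD i 0) hpv
  by_cases hex : ∃ j, j < i ∧ nums.getD j 0 < nums.getD i 0
  · rcases pvExists_max nums (nums.getD i 0) hex with ⟨j, hj, hjv, hjm⟩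
    have hjS : j ∈ pvStkL nums i :=
      (hm j).mpr ⟨hj, fun k h1 h2 => lt_of_lt_of_le hjv (hjm k h1 h2)⟩
    have hjP : j ∈ pvPopWhile nums (nums.getD i 0) (pvStkL nums i) :=
      (hmemP j).mpr ⟨hjS, hjv⟩
    cases hP : pvPopWhile nums (nums.getD i 0) (pvStkL nums i) with
    | nil => rw [hP] at hjP; cases hjP
    | cons h t =>
      have hPp : (pvPopWhile nums (nums.getD i 0) (pvStkL nums i)).Pairwise
          (fun a b : Nat => b < a) :=
        (hp.sublist (pvPopWhile_sublist _ _ _)).imp (fun h => h.1)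
      have hjh : j ≤ h := pvHead_max hPp hP (hP ▸ hjP)
      have hhP : h ∈ pvPopWhile nums (nums.getD i 0) (pvStkL nums i) := by
        rw [hP]; exact List.mem_cons_self
      rcases (hmemP h).mp hhP with ⟨hhS, hhv⟩
      have hhi : h < i := ((hm h).mp hhS).1
      have hhj : h ≤ j := by
        by_contra hc
        exact absurd (hjm h (by omega) hhi) (not_le.mpr hhv)
      have : h = j := by omega
      subst this
      rw [pvPrevScan_eq nums _ hj hjv hjm]
  · push_neg at hex
    have hP : pvPopWhile nums (nums.getD i 0) (pvStkL nums i) = [] := by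
      cases hP : pvPopWhile nums (nums.getD i 0) (pvStkL nums i) with
      | nil => rfl
      | cons h t =>
        have hhP : h ∈ pvPopWhile nums (nums.getD i 0) (pvStkL nums i) := by
          rw [hP]; exact List.mem_cons_self
        rcases (hmemP h).mp hhP with ⟨hhS, hhv⟩
        exact absurd hhv (not_lt.mpr (hex h ((hm h).mp hhS).1))
    rw [hP, pvPrevScan_eq_neg nums _ i (fun j hj => hex j hj)]

lemma pvKeyR (nums : List Int) (i : Nat) :
    pvNextScan nums (nums.getD i 0) (i + 1) =
      (match pvPopWhile nums (nums.getD i 0) (pvStkR nums (i + 1)) with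
       | [] => (nums.length : Int)
       | j :: _ => (j : Int)) := by
  rcases pvStkR_inv nums (nums.length - (i + 1)) (i + 1) rfl with ⟨hp, hm⟩
  have hpv : (pvStkR nums (i + 1)).Pairwise (fun a b => nums.getD b 0 < nums.getD a 0) :=
    hp.imp (fun h => h.2)
  have hmemP := pvMem_popWhile (x := nums.getD i 0) hpv
  by_cases hex : ∃ j, i + 1 ≤ j ∧ j < nums.length ∧ nums.getD j 0 < nums.getD i 0
  · rcases pvExists_min nums (nums.getD i 0) (nums.length - (i + 1)) (i + 1) rfl hex with
      ⟨j, hj, hjn, hjv, hjm⟩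
    have hjS : j ∈ pvStkR nums (i + 1) :=
      (hm j).mpr ⟨hj, hjn, fun k h1 h2 => lt_of_lt_of_le hjv (hjm k h1 h2)⟩
    have hjP : j ∈ pvPopWhile nums (nums.getD i 0) (pvStkR nums (i + 1)) :=
      (hmemP j).mpr ⟨hjS, hjv⟩
    cases hP : pvPopWhile nums (nums.getD i 0) (pvStkR nums (i + 1)) with
    | nil => rw [hP] at hjP; cases hjP
    | cons h t =>
      have hPp : (pvPopWhile nums (nums.getD i 0) (pvStkR nums (i + 1))).Pairwise
          (fun a b : Nat => a < b) :=
        (hp.sublist (pvPopWhile_sublist _ _ _)).imp (fun h => h.1)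
      have hhj : h ≤ j := pvHead_min hPp hP (hP ▸ hjP)
      have hhP : h ∈ pvPopWhile nums (nums.getD i 0) (pvStkR nums (i + 1)) := by
        rw [hP]; exact List.mem_cons_self
      rcases (hmemP h).mp hhP with ⟨hhS, hhv⟩
      rcases (hm h).mp hhS with ⟨hhi, hhn, _⟩
      have hjh : j ≤ h := by
        by_contra hc
        exact absurd (hjm h hhi (by omega)) (not_le.mpr hhv)
      have : h = j := by omega
      subst this
      rw [pvNextScan_eq nums _ (nums.length - (i + 1)) (i + 1) rfl _ hj hjn hjv hjm]
  · push_neg at hex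
    have hP : pvPopWhile nums (nums.getD i 0) (pvStkR nums (i + 1)) = [] := by
      cases hP : pvPopWhile nums (nums.getD i 0) (pvStkR nums (i + 1)) with
      | nil => rfl
      | cons h t =>
        have hhP : h ∈ pvPopWhile nums (nums.getD i 0) (pvStkR nums (i + 1)) := by
          rw [hP]; exact List.mem_cons_self
        rcases (hmemP h).mp hhP with ⟨hhS, hhv⟩
        rcases (hm h).mp hhS with ⟨hhi, hhn, _⟩
        exact absurd hhv (not_lt.mpr (hex h hhi hhn))
    rw [hP, pvNextScan_eq_none nums _ (nums.length - (i + 1)) (i + 1) rfl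
      (fun k h1 h2 => hex k h1 h2)]

lemma pvLeftFold (nums : List Int) : ∀ m, m ≤ nums.length →
    (((List.range m).foldl (pvPassStep nums) (List.replicate nums.length (-1), [])).2 =
      pvStkL nums m ∧
     ((List.range m).foldl (pvPassStep nums) (List.replicate nums.length (-1), [])).1.length =
      nums.length ∧
     ∀ i, i < nums.length →
       ((List.range m).foldl (pvPassStep nums) (List.replicate nums.length (-1), [])).1.getD i 0 =
         if i < m then pvPrevScan nums (nums.getD i 0) i else -1) := by
  intro m
  induction m with
  | zero =>
    intro _
    refine ⟨rfl, by simp, fun i hi => ?_⟩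
    simp [List.getD, hi]
  | succ m ih =>
    intro hm
    rcases ih (by omega) with ⟨hs, hl, he⟩
    rw [List.range_succ, List.foldl_append, List.foldl_cons, List.foldl_nil]
    simp only [pvPassStep, hs]
    have hkey := pvKeyL nums m
    simp only [List.getD_eq_getElem?_getD] at hkey he ⊢
    cases hP : pvPopWhile nums (nums[m]?.getD 0) (pvStkL nums m) with
    | nil =>
      rw [hP] at hkey
      refine ⟨by simp [pvStkL, List.getD_eq_getElem?_getD, hP], by simpa using hl,
        fun i hi => ?_⟩
      rw [he i hi]
      by_cases him : i < m
      · rw [if_pos him, if_pos (by omega)]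
      · by_cases him' : i = m
        · subst him'
          rw [if_neg (by omega), if_pos (by omega), hkey]
        · rw [if_neg him, if_neg (by omega)]
    | cons j t =>
      rw [hP] at hkey
      refine ⟨by simp [pvStkL, List.getD_eq_getElem?_getD, hP], by simpa using hl,
        fun i hi => ?_⟩
      by_cases him' : i = m
      · subst him'
        rw [if_pos (by omega), hkey, List.getElem?_set_self (by omega), Option.getD_some]
      · rw [List.getElem?_set_ne (by omega), he i hi]
        by_cases him : i < m
        · rw [if_pos him, if_pos (by omega)]
        · rw [if_neg him, if_neg (by omega)]

lemma pvRightFold (nums : List Int) : ∀ f m, m ≤ nums.length → nums.length - m = f →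
    (((List.range' m (nums.length - m)).foldr (fun i s => pvPassStep nums s i)
        (List.replicate nums.length (nums.length : Int), [])).2 = pvStkR nums m ∧
     ((List.range' m (nums.length - m)).foldr (fun i s => pvPassStep nums s i)
        (List.replicate nums.length (nums.length : Int), [])).1.length = nums.length ∧
     ∀ i, i < nums.length →
       ((List.range' m (nums.length - m)).foldr (fun i s => pvPassStep nums s i)
          (List.replicate nums.length (nums.length : Int), [])).1.getD i 0 =
         if m ≤ i then pvNextScan nums (nums.getD i 0) (i + 1) else (nums.length : Int)) := by
  intro f
  induction f with
  | zero =>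
    intro m hm hf
    rw [hf]
    refine ⟨by rw [pvStkR, dif_neg (by omega)]; rfl, by simp, fun i hi => ?_⟩
    rw [if_neg (by omega)]
    simp [List.getD, hi]
  | succ f ih =>
    intro m hm hf
    have hmn : m < nums.length := by omega
    rcases ih (m + 1) (by omega) (by omega) with ⟨hs, hl, he⟩
    have hrange : nums.length - m = (nums.length - (m + 1)) + 1 := by omega
    rw [hrange, List.range'_succ, List.foldr_cons]
    set st := (List.range' (m + 1) (nums.length - (m + 1))).foldr
      (fun i s => pvPassStep nums s i)
      (List.replicate nums.length ((nums.length : Int)), ([] : List Nat)) with hst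
    simp only [pvPassStep, hs]
    have hkey := pvKeyR nums m
    have hstk : pvStkR nums m = m :: pvPopWhile nums (nums.getD m 0) (pvStkR nums (m + 1)) := by
      rw [pvStkR, dif_pos hmn]
    simp only [List.getD_eq_getElem?_getD] at hkey he hstk ⊢
    cases hP : pvPopWhile nums (nums[m]?.getD 0) (pvStkR nums (m + 1)) with
    | nil =>
      rw [hP] at hkey
      refine ⟨by rw [hstk, hP], by simpa using hl, fun i hi => ?_⟩
      rw [he i hi]
      by_cases him : m + 1 ≤ i
      · rw [if_pos him, if_pos (by omega)]
      · by_cases him' : i = m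
        · subst him'
          rw [if_neg (by omega), if_pos (le_refl _), hkey]
        · rw [if_neg him, if_neg (by omega)]
    | cons j t =>
      rw [hP] at hkey
      refine ⟨by rw [hstk, hP], by simpa using hl, fun i hi => ?_⟩
      by_cases him' : i = m
      · subst him'
        rw [if_pos (le_refl _), hkey, List.getElem?_set_self (by omega), Option.getD_some]
      · rw [List.getElem?_set_ne (by omega), he i hi]
        by_cases him : m + 1 ≤ i
        · rw [if_pos him, if_pos (by omega)]
        · rw [if_neg him, if_neg (by omega)]

lemma pvFinal_eq (nums : List Int) (t : Int) (pl nl : List Int)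
    (hpl : ∀ i, i < nums.length → pl.getD i 0 = pvPrevScan nums (nums.getD i 0) i)
    (hnl : ∀ i, i < nums.length → nl.getD i 0 = pvNextScan nums (nums.getD i 0) (i + 1)) :
    ∀ f i, nums.length - i = f → pvFinalLoop nums t pl nl i = pvAltLoop nums t i := by
  intro f
  induction f with
  | zero =>
    intro i hi
    rw [pvFinalLoop, pvAltLoop, dif_neg (by omega), dif_neg (by omega)]
  | succ f ih =>
    intro i hi
    have hin : i < nums.length := by omega
    rw [pvFinalLoop, pvAltLoop, dif_pos hin, dif_pos hin]
    simp only [hpl i hin, hnl i hin]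
    split
    · rfl
    · exact ih (i + 1) (by omega)

-- ===== VERDICT (by name: the statement is the Claim_ definition above) =====
theorem validSubarraySize_spec : Claim_equal_validSubarraySize := by
  intro nums threshold _
  unfold Spec_validSubarraySize validSubarraySize validSubarraySize_alt
  simp only
  rcases pvLeftFold nums nums.length (le_refl _) with ⟨_, _, hel⟩
  have hrw : (List.range nums.length).reverse.foldl (pvPassStep nums)
      (List.replicate nums.length (nums.length : Int), []) =
      (List.range' 0 (nums.length - 0)).foldr (fun i s => pvPassStep nums s i)
      (List.replicate nums.length (nums.length : Int), []) := by
    rw [List.foldl_reverse, Nat.sub_zero, ← List.range_eq_range']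
  rcases pvRightFold nums nums.length 0 (by omega) rfl with ⟨_, _, her⟩
  rw [hrw]
  exact pvFinal_eq nums threshold _ _
    (fun i hi => by rw [hel i hi, if_pos hi])
    (fun i hi => by rw [her i hi, if_pos (by omega)])
    nums.length 0 rfl
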